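-- pv_equiv track=rewrite | github.com/CaspianA1/S2CPP | Transpile/code_style.py | frm
-- ===== SOURCE A (Python) =====
-- def frm(code: str) -> str:
-- 	next_tab = False
-- 	new_code = ""
-- 	for index, row in enumerate((as_lst := code.split("\n"))):
-- 		if row.endswith("{"):
-- 			next_tab = True
--
-- 		elif next_tab:
-- 			as_lst[index] = "\t" + row
-- 			if as_lst[index][0] == "{":
-- 				next_tab = False
--
-- 	return "\n".join(as_lst)
-- ===== SOURCE B (Python) =====
-- def frm(code: str) -> str:
-- 	# Two-phase: copy lines verbatim up to and including the first line ending
-- 	# in "{"; then tab every later line that does not itself end in "{".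
-- 	out = []
-- 	it = iter(code.split("\n"))
-- 	for ln in it:
-- 		out.append(ln)
-- 		if ln.endswith("{"):
-- 			break
-- 	out += [ln if ln.endswith("{") else "\t" + ln for ln in it]
-- 	return "\n".join(out)
-- ===== Notes on version B (the rewrite author's own statement) =====
-- stated objective: simpler
-- what changed: Replaces the stateful per-line next_tab flag (with its dead reset branch) by a two-phase structure: locate the first brace-ending line, keep everything up to it verbatim, then map a tab onto every later non-brace line.
import Mathlib
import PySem

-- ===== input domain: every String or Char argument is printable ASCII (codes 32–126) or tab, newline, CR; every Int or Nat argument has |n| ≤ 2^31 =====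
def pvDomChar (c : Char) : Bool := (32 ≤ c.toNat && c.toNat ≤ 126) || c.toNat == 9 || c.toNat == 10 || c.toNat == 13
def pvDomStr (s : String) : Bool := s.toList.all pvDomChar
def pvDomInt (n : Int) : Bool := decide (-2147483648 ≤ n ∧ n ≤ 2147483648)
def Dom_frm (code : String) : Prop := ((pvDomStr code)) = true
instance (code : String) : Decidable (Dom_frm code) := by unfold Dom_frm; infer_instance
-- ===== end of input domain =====

-- B replaces A's stateful per-line next_tab flag with a pivot-then-map two-phase decomposition (simpler; same cost).

-- ===== PORT A =====
-- the for-loop over enumerate(as_lst) with the mutable next_tab flag, as structural recursion over the rows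
def frmLoopA : Bool → List String → List String
  | _, [] => []
  | tab, row :: rest =>
    if PySem.Str.endswith row "{" then row :: frmLoopA true rest
    else if tab then
      let newRow := String.ofList ('\t' :: row.toList)   -- "\t" + row
      if PySem.Str.pyGet? newRow 0 == some '{' then newRow :: frmLoopA false rest
      else newRow :: frmLoopA true rest
    else row :: frmLoopA tab rest

def frm (code : String) : String :=
  PySem.Str.join "\n" (frmLoopA false ((PySem.Str.split? code "\n").getD []))

-- ===== PORT B =====
-- phase 1: lines copied verbatim up to and including the first line ending in "{", paired with the remaining lines
def frmAltSplit : List String → List String × List String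
  | [] => ([], [])
  | ln :: rest =>
    if PySem.Str.endswith ln "{" then ([ln], rest)
    else
      let p := frmAltSplit rest
      (ln :: p.1, p.2)

-- phase 2: the per-line mapping applied to the tail
def frmAltTab (ln : String) : String :=
  if PySem.Str.endswith ln "{" then ln else String.ofList ('\t' :: ln.toList)

def frm_alt (code : String) : String :=
  let p := frmAltSplit ((PySem.Str.split? code "\n").getD [])
  PySem.Str.join "\n" (p.1 ++ p.2.map frmAltTab)

-- ===== PRECONDITION & SPEC =====
def Spec_frm (code : String) (out : String) : Prop := out = frm_alt code
instance (code : String) (out : String) : Decidable (Spec_frm code out) := by unfold Spec_frm; infer_instance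

-- ===== CLAIM (what is proved, stated in full; the proofs are below) =====
def Claim_equal_frm : Prop := ∀ (code : String), Dom_frm code → Spec_frm code (frm code)

-- ===== LEMMAS AND PROOFS =====

-- once the flag is set it never clears (the tabbed row starts with '\t', not '{'), so the loop becomes a map
theorem frmLoopA_true (l : List String) : frmLoopA true l = l.map frmAltTab := by
  induction l with
  | nil => rfl
  | cons row rest ih =>
    simp only [frmLoopA, frmAltTab, List.map]
    by_cases h : PySem.Chars.endswith row.toList ['{']
    · simp [h, ih]
    · simp [h, ih, PySem.Str.pyGet?]

-- with the flag off, the loop copies rows until the first brace-ending row, then runs with the flag on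
theorem frmLoopA_false (l : List String) :
    frmLoopA false l = (frmAltSplit l).1 ++ (frmAltSplit l).2.map frmAltTab := by
  induction l with
  | nil => rfl
  | cons row rest ih =>
    simp only [frmLoopA, frmAltSplit]
    by_cases h : PySem.Chars.endswith row.toList ['{']
    · simp [h, frmLoopA_true rest]
    · simp [h, ih]

-- ===== VERDICT (by name: the statement is the Claim_ definition above) =====
theorem frm_spec : Claim_equal_frm := by
  intro code _
  unfold Spec_frm frm frm_alt
  rw [frmLoopA_false]
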